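-- pv_equiv track=rewrite | github.com/IIHTDevelopers/Yaksha-Python-A20-sets--Social_Network_Graph_Analysis-Template | social_network_graph_analysis.py | is_second_degree_connection
-- ===== SOURCE A (Python) =====
-- def is_direct_connection(user_a, user_b, connections):
--     """
--     Check if two users are directly connected.
--
--     Args:
--         user_a (str): First user
--         user_b (str): Second user
--         connections (dict): Dictionary of user connections
--
--     Returns:
--         bool: True if directly connected, False otherwise
--     """
--     if connections is None:
--         raise ValueError("Connections cannot be None")
--
--     if user_a not in connections:
--         raise ValueError(f"User {user_a} not found in connections")
--
--     return user_b in connections[user_a]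
--
-- def is_second_degree_connection(user_a, user_b, connections):
--     """
--     Check if two users are connected through a mutual friend.
--
--     Args:
--         user_a (str): First user
--         user_b (str): Second user
--         connections (dict): Dictionary of user connections
--
--     Returns:
--         bool: True if second-degree connected, False otherwise
--     """
--     if connections is None:
--         raise ValueError("Connections cannot be None")
--
--     if user_a not in connections:
--         raise ValueError(f"User {user_a} not found in connections")
--     if user_b not in connections:
--         raise ValueError(f"User {user_b} not found in connections")
--
--     # If they're directly connected, they're not second-degree
--     if is_direct_connection(user_a, user_b, connections):
--         return False
--
--     # Check if any of user_a's friends is also a friend of user_b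
--     for friend in connections[user_a]:
--         if friend in connections and user_b in connections[friend]:
--             return True
--
--     return False
-- ===== SOURCE B (Python) =====
-- def is_second_degree_connection(user_a, user_b, connections):
--     if connections is None:
--         raise ValueError("Connections cannot be None")
--     if user_a not in connections:
--         raise ValueError(f"User {user_a} not found in connections")
--     if user_b not in connections:
--         raise ValueError(f"User {user_b} not found in connections")
--     # If they're directly connected, they're not second-degree
--     if user_b in connections[user_a]:
--         return False
--     # Index of user_b's predecessors (users whose friend list contains user_b),
--     # then one disjointness test against user_a's friends.
--     preds = {f for f, fl in connections.items() if user_b in fl}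
--     return not preds.isdisjoint(connections[user_a])
-- ===== Notes on version B (the rewrite author's own statement) =====
-- stated objective: alternative
-- what changed: Instead of scanning user_a's friends with a per-friend dict lookup, B builds the set of user_b's predecessors in one pass over the whole dict and answers with a single set-disjointness test against user_a's friend list.
import Mathlib
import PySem

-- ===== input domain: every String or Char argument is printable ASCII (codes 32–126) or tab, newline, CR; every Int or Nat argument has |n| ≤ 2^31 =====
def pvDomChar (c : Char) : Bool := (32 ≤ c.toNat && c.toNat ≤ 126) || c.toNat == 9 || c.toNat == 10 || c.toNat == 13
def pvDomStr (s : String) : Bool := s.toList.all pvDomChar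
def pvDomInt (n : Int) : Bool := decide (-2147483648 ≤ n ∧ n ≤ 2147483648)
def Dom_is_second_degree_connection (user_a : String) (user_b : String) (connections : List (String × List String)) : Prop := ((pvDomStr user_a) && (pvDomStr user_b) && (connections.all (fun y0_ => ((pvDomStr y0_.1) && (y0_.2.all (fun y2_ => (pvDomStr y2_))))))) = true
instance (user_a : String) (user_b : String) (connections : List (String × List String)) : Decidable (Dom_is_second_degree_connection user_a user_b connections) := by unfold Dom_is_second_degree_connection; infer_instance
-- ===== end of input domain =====

-- B replaces A's per-friend dict-lookup scan by building the set of user_b's predecessors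
-- in one pass over the dict, then a single disjointness test (alternative decomposition).


-- ===== PORT A =====
def is_direct_connection (user_a : String) (user_b : String) (connections : List (String × List String)) : Bool :=
  ((PySem.Dict.mk connections).getD user_a []).contains user_b

def is_second_degree_connection (user_a : String) (user_b : String) (connections : List (String × List String)) : Bool :=
  let d := PySem.Dict.mk connections
  if is_direct_connection user_a user_b connections then false
  else
    -- for friend in connections[user_a]: if friend in connections and user_b in connections[friend]: return True
    (d.getD user_a []).any (fun friend => d.contains friend && (d.getD friend []).contains user_b)

-- ===== PORT B =====
def is_second_degree_connection_alt (user_a : String) (user_b : String) (connections : List (String × List String)) : Bool :=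
  let d := PySem.Dict.mk connections
  if (d.getD user_a []).contains user_b then false
  else
    -- preds = {f for f, fl in connections.items() if user_b in fl}
    let preds : PySem.Set String :=
      PySem.Set.ofList ((connections.filter (fun p => p.2.contains user_b)).map Prod.fst)
    -- not preds.isdisjoint(connections[user_a])
    !(PySem.Set.isdisjoint preds (d.getD user_a []))

-- ===== PRECONDITION & SPEC =====
-- A raises ValueError when user_a or user_b is not a key; keys are Nodup because a
-- list with duplicate keys does not represent any Python dict input.
def Pre_is_second_degree_connection (user_a : String) (user_b : String) (connections : List (String × List String)) : Prop :=
  user_a ∈ connections.map Prod.fst ∧ user_b ∈ connections.map Prod.fst ∧ (connections.map Prod.fst).Nodup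
instance (user_a : String) (user_b : String) (connections : List (String × List String)) : Decidable (Pre_is_second_degree_connection user_a user_b connections) := by unfold Pre_is_second_degree_connection; infer_instance

def pvWitness_is_second_degree_connection : String × String × (List (String × List String)) :=
  ("a", "b", [("a", ["c"]), ("b", []), ("c", ["b"])])

def Spec_is_second_degree_connection (user_a : String) (user_b : String) (connections : List (String × List String)) (out : Bool) : Prop := out = is_second_degree_connection_alt user_a user_b connections
instance (user_a : String) (user_b : String) (connections : List (String × List String)) (out : Bool) : Decidable (Spec_is_second_degree_connection user_a user_b connections out) := by unfold Spec_is_second_degree_connection; infer_instance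

-- ===== CLAIM (what is proved, stated in full; the proofs are below) =====
def Claim_equal_is_second_degree_connection : Prop := ∀ (user_a : String) (user_b : String) (connections : List (String × List String)), Dom_is_second_degree_connection user_a user_b connections → Pre_is_second_degree_connection user_a user_b connections → Spec_is_second_degree_connection user_a user_b connections (is_second_degree_connection user_a user_b connections)

-- ===== LEMMAS AND PROOFS =====
-- Membership in B's predecessor set equals A's per-friend test, given unique keys.
theorem mem_preds_iff (user_b f : String) (connections : List (String × List String))
    (hnd : ((PySem.Dict.mk connections).keys).Nodup) :
    (f ∈ PySem.Set.ofList ((connections.filter (fun p => p.2.contains user_b)).map Prod.fst))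
      ↔ ((PySem.Dict.mk connections).contains f
          ∧ user_b ∈ (PySem.Dict.mk connections).getD f []) := by
  rw [PySem.Set.mem_ofList]
  simp only [List.mem_map, List.mem_filter]
  constructor
  · rintro ⟨⟨k, fl⟩, ⟨hmem, hb⟩, rfl⟩
    have hget : (PySem.Dict.mk connections).get? k = some fl :=
      (PySem.Dict.get?_eq_some_iff_mem_items _ _ _ hnd).mpr hmem
    refine ⟨?_, ?_⟩
    · rw [PySem.Dict.contains_eq_isSome_get?, hget]; rfl
    · rw [PySem.Dict.getD_of_get?_eq_some _ [] hget]
      simpa using hb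
  · rintro ⟨hc, hb⟩
    rw [PySem.Dict.contains_eq_isSome_get?] at hc
    obtain ⟨fl, hget⟩ := Option.isSome_iff_exists.mp hc
    refine ⟨(f, fl), ⟨PySem.Dict.mem_items_of_get?_eq_some _ hget, ?_⟩, rfl⟩
    rw [PySem.Dict.getD_of_get?_eq_some _ [] hget] at hb
    simpa using hb

-- ===== VERDICT (by name: the statement is the Claim_ definition above) =====
theorem is_second_degree_connection_spec : Claim_equal_is_second_degree_connection := by
  intro user_a user_b connections _ hpre
  obtain ⟨_, _, hnd⟩ := hpre
  unfold Spec_is_second_degree_connection is_second_degree_connection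
    is_second_degree_connection_alt is_direct_connection
  by_cases hdir : user_b ∈ (PySem.Dict.mk connections).getD user_a []
  · simp [hdir]
  · simp [hdir]
    have hfe : (connections.filter fun p => decide (user_b ∈ p.2))
        = (connections.filter fun p => p.2.contains user_b) := by simp
    rw [Bool.eq_iff_iff, List.any_eq_true, Bool.not_eq_true', hfe]
    constructor
    · rintro ⟨f, hfa, hP⟩
      rw [Bool.and_eq_true] at hP
      have hc : (PySem.Dict.mk connections).contains f = true := hP.1
      have hb : user_b ∈ (PySem.Dict.mk connections).getD f [] := by simpa using hP.2
      have hfp := (mem_preds_iff user_b f connections hnd).mpr ⟨hc, hb⟩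
      refine Bool.eq_false_iff.mpr (fun hdisj => ?_)
      exact (PySem.Set.isdisjoint_iff _ _).mp hdisj f hfp hfa
    · intro hdisj
      have hnall : ¬ ∀ x ∈ PySem.Set.ofList
          ((connections.filter fun p => p.2.contains user_b).map Prod.fst),
          x ∉ (PySem.Dict.mk connections).getD user_a [] := fun hall => by
        rw [(PySem.Set.isdisjoint_iff _ _).mpr hall] at hdisj
        exact absurd hdisj (by simp)
      push Not at hnall
      obtain ⟨f, hfp, hfa⟩ := hnall
      obtain ⟨hc, hb⟩ := (mem_preds_iff user_b f connections hnd).mp hfp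
      exact ⟨f, hfa, by rw [Bool.and_eq_true]; exact ⟨hc, by simpa using hb⟩⟩
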